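-- pv_equiv track=rewrite | github.com/balasrinivasanammu/Mallareddy-IT | hackerrank-sumvsxor.py | sumXor
-- ===== SOURCE A (Python) =====
-- def sumXor(n):
--
--     if n < 0:
--         return 0
--     count = 0
--     while n:
--         # Check if the lowest bit is zero
--         if n & 1 == 0:
--             count += 1
--         n >>= 1
--     return 2 ** count
-- ===== SOURCE B (Python) =====
-- def sumXor(n):
--     if n < 0:
--         return 0
--     return 2 ** (n.bit_length() - bin(n).count('1'))
-- ===== Notes on version B (the rewrite author's own statement) =====
-- stated objective: idiomatic
-- what changed: Replaces the bit-by-bit while loop that counts zero bits with the complement formula bit_length(n) - popcount(n) computed by built-ins.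
import Mathlib
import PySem

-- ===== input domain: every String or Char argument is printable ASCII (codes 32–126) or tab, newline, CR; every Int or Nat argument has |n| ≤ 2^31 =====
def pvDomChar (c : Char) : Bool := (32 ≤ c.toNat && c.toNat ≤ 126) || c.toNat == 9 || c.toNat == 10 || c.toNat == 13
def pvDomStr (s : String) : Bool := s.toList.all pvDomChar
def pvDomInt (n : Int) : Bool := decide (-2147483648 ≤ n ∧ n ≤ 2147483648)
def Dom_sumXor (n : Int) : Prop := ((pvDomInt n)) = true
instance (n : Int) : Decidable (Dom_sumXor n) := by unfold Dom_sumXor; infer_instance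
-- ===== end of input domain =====

-- B computes the zero-bit count as bit_length minus popcount instead of A's bit-by-bit zero-counting loop (idiomatic).
-- ===== PORT A =====
-- A's while loop: n ≥ 0 at entry, so it is the obvious structural recursion on Nat
def sumXorLoop (m : Nat) (count : Nat) : Nat :=
  if h : m ≠ 0 then
    sumXorLoop (m / 2) (count + (if m % 2 == 0 then 1 else 0))
  else count
decreasing_by exact Nat.div_lt_self (Nat.pos_of_ne_zero h) (by norm_num)

def sumXor (n : Int) : Int :=
  if n < 0 then 0
  else (2 : Int) ^ (sumXorLoop n.toNat 0)

-- ===== PORT B =====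
-- n.bit_length()
def bitLen (m : Nat) : Nat :=
  if h : m ≠ 0 then bitLen (m / 2) + 1 else 0
decreasing_by exact Nat.div_lt_self (Nat.pos_of_ne_zero h) (by norm_num)

-- bin(n).count('1') = popcount
def popCnt (m : Nat) : Nat :=
  if h : m ≠ 0 then popCnt (m / 2) + m % 2 else 0
decreasing_by exact Nat.div_lt_self (Nat.pos_of_ne_zero h) (by norm_num)

def sumXor_alt (n : Int) : Int :=
  if n < 0 then 0
  else (2 : Int) ^ (bitLen n.toNat - popCnt n.toNat)

-- ===== PRECONDITION & SPEC =====
def Spec_sumXor (n : Int) (out : Int) : Prop := out = sumXor_alt n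
instance (n : Int) (out : Int) : Decidable (Spec_sumXor n out) := by unfold Spec_sumXor; infer_instance

-- ===== CLAIM (what is proved, stated in full; the proofs are below) =====
def Claim_equal_sumXor : Prop := ∀ (n : Int), Dom_sumXor n → Spec_sumXor n (sumXor n)

-- ===== LEMMAS AND PROOFS =====

-- ===== VERDICT (by name: the statement is the Claim_ definition above) =====
theorem pop_le_bitLen (m : Nat) : popCnt m ≤ bitLen m := by
  induction m using Nat.strong_induction_on with
  | _ m ih =>
    by_cases h : m = 0
    · simp [popCnt, bitLen, h]
    · rw [popCnt, bitLen]
      simp only [h, ne_eq, not_false_eq_true, dif_pos]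
      have := ih (m / 2) (Nat.div_lt_self (Nat.pos_of_ne_zero h) (by norm_num))
      omega

theorem loop_eq (m c : Nat) : sumXorLoop m c = c + (bitLen m - popCnt m) := by
  induction m using Nat.strong_induction_on generalizing c with
  | _ m ih =>
    by_cases h : m = 0
    · simp [sumXorLoop, bitLen, popCnt, h]
    · rw [sumXorLoop, bitLen, popCnt]
      simp only [h, ne_eq, not_false_eq_true, dif_pos]
      rw [ih (m / 2) (Nat.div_lt_self (Nat.pos_of_ne_zero h) (by norm_num))]
      have hle := pop_le_bitLen (m / 2)
      have hm2 : m % 2 < 2 := Nat.mod_lt _ (by norm_num)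
      by_cases he : m % 2 = 0 <;> simp [he] <;> omega

-- ===== VERDICT (by name: the statement is the Claim_ definition above) =====
theorem sumXor_spec : Claim_equal_sumXor := by
  intro n _
  unfold Spec_sumXor sumXor sumXor_alt
  by_cases h : n < 0
  · simp [h]
  · simp [h, loop_eq]
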